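-- pv_equiv track=rewrite | github.com/sanjaysrivastav98/Academic-Projects | AI3/constraints.py | Tutorial_constraint_3
-- ===== SOURCE A (Python) =====
-- def Tutorial_constraint_3(CSP,CG,from_node):
-- 	if len(from_node)>0:
-- 		if len(from_node[0])>0:
-- 			tens_l=from_node[0][0]//10
-- 			for i in range(len(from_node[0])):
-- 				tens_l=from_node[0][i]//10
-- 				for j in range(len(from_node[1])):
-- 					tens_t=from_node[1][j]//10
-- 					if tens_t==tens_l:
-- 						return False
-- 	return True
-- ===== SOURCE B (Python) =====
-- def Tutorial_constraint_3(CSP, CG, from_node):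
--     if len(from_node) > 0 and len(from_node[0]) > 0:
--         s0 = {x // 10 for x in from_node[0]}
--         s1 = {y // 10 for y in from_node[1]}
--         return not (s0 & s1)
--     return True
-- ===== Notes on version B (the rewrite author's own statement) =====
-- stated objective: idiomatic
-- what changed: Replaces the quadratic nested index loops with two set comprehensions of tens digits and a single set intersection (disjointness test), changing what is maintained from per-pair comparisons to two hash sets.
import Mathlib
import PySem

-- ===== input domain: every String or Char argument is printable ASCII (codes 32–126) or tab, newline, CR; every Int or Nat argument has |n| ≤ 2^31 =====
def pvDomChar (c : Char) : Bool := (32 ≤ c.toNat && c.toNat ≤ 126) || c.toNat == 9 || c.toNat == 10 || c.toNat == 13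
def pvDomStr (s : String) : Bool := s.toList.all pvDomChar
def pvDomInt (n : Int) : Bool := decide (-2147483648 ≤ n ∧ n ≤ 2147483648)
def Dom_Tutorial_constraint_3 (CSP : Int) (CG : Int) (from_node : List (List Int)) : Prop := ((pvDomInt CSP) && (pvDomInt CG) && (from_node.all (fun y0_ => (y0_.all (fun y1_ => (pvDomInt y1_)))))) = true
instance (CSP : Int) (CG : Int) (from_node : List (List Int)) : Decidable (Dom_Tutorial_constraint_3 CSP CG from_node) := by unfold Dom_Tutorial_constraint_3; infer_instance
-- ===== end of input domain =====

-- B replaces A's nested index loops by two tens-digit sets and one set-intersection disjointness test (idiomatic; same results, including the IndexError on a length-1 from_node, excluded by Pre_).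


-- ===== PORT A =====
-- nested loops over indices; 'return False' on the first matching pair = short-circuit any/any
def Tutorial_constraint_3 (CSP : Int) (CG : Int) (from_node : List (List Int)) : Bool :=
  if from_node.length > 0 then
    let row0 := PySem.List.pyGetD from_node 0 []
    if row0.length > 0 then
      let row1 := PySem.List.pyGetD from_node 1 []   -- Pre_ guarantees index 1 exists (Python raises IndexError otherwise)
      if row0.any (fun x => row1.any (fun y => PySem.Int.floordiv y 10 == PySem.Int.floordiv x 10)) then
        false
      else true
    else true
  else true

-- ===== PORT B =====
def Tutorial_constraint_3_alt (CSP : Int) (CG : Int) (from_node : List (List Int)) : Bool :=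
  if from_node.length > 0 && (PySem.List.pyGetD from_node 0 []).length > 0 then
    let s0 : PySem.Set Int := PySem.Set.ofList ((PySem.List.pyGetD from_node 0 []).map (fun x => PySem.Int.floordiv x 10))
    let s1 : PySem.Set Int := PySem.Set.ofList ((PySem.List.pyGetD from_node 1 []).map (fun y => PySem.Int.floordiv y 10))
    (PySem.Set.inter s0 s1).isEmpty
  else true

-- ===== PRECONDITION & SPEC =====
-- Pre_ excludes exactly the inputs where Python A raises IndexError: from_node of length 1 with a nonempty first row (from_node[1] is read).
def Pre_Tutorial_constraint_3 (CSP : Int) (CG : Int) (from_node : List (List Int)) : Prop :=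
  ¬ (from_node.length = 1 ∧ PySem.List.pyGetD from_node 0 [] ≠ [])
instance (CSP : Int) (CG : Int) (from_node : List (List Int)) : Decidable (Pre_Tutorial_constraint_3 CSP CG from_node) := by unfold Pre_Tutorial_constraint_3; infer_instance
def pvWitness_Tutorial_constraint_3 : Int × Int × List (List Int) := (0, 0, [[1, 25], [11, 7]])

def Spec_Tutorial_constraint_3 (CSP : Int) (CG : Int) (from_node : List (List Int)) (out : Bool) : Prop := out = Tutorial_constraint_3_alt CSP CG from_node
instance (CSP : Int) (CG : Int) (from_node : List (List Int)) (out : Bool) : Decidable (Spec_Tutorial_constraint_3 CSP CG from_node out) := by unfold Spec_Tutorial_constraint_3; infer_instance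

-- ===== CLAIM (what is proved, stated in full; the proofs are below) =====
def Claim_equal_Tutorial_constraint_3 : Prop := ∀ (CSP : Int) (CG : Int) (from_node : List (List Int)), Dom_Tutorial_constraint_3 CSP CG from_node → Pre_Tutorial_constraint_3 CSP CG from_node → Spec_Tutorial_constraint_3 CSP CG from_node (Tutorial_constraint_3 CSP CG from_node)

-- ===== LEMMAS AND PROOFS =====
-- the any/any pair scan equals non-disjointness of the two mapped tens-digit sets
lemma anyany_eq_not_isEmpty_inter (r0 r1 : List Int) :
    r0.any (fun x => r1.any (fun y => PySem.Int.floordiv y 10 == PySem.Int.floordiv x 10))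
      = !(PySem.Set.inter (PySem.Set.ofList (r0.map (fun x => PySem.Int.floordiv x 10)))
                          (PySem.Set.ofList (r1.map (fun y => PySem.Int.floordiv y 10)))).isEmpty := by
  have hne : ∀ (l : List Int), l ≠ [] ↔ ∃ t, t ∈ l := by
    intro l; rw [← not_iff_not]; push Not; simp [List.eq_nil_iff_forall_not_mem]
  rw [Bool.eq_iff_iff, Bool.not_eq_true', List.isEmpty_eq_false_iff, hne]
  simp only [List.any_eq_true, beq_iff_eq, PySem.Set.mem_inter, PySem.Set.mem_ofList, List.mem_map]
  constructor
  · rintro ⟨x, hx, y, hy, h⟩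
    exact ⟨_, ⟨x, hx, rfl⟩, ⟨y, hy, h⟩⟩
  · rintro ⟨t, ⟨x, hx, rfl⟩, ⟨y, hy, h⟩⟩
    exact ⟨x, hx, y, hy, h⟩

-- ===== VERDICT (by name: the statement is the Claim_ definition above) =====
theorem Tutorial_constraint_3_spec : Claim_equal_Tutorial_constraint_3 := by
  intro CSP CG from_node _ hpre
  unfold Spec_Tutorial_constraint_3
  match from_node with
  | [] => rfl
  | [r0] =>
    have hr0 : r0 = [] := by
      by_contra h
      exact hpre ⟨rfl, by simpa [pysem] using h⟩
    subst hr0; rfl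
  | r0 :: r1 :: rest =>
    have h0 : PySem.List.pyGetD (r0 :: r1 :: rest) 0 [] = r0 := by simp [pysem]
    have h1 : PySem.List.pyGetD (r0 :: r1 :: rest) 1 [] = r1 := by simp [pysem]
    simp only [Tutorial_constraint_3, Tutorial_constraint_3_alt, h0, h1]
    by_cases hr0 : r0.length > 0
    · simp only [List.length_cons, Nat.zero_lt_succ, if_true, hr0, gt_iff_lt,
        decide_true, Bool.true_and, anyany_eq_not_isEmpty_inter r0 r1]
      cases (PySem.Set.inter (PySem.Set.ofList (r0.map (fun x => PySem.Int.floordiv x 10)))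
        (PySem.Set.ofList (r1.map (fun y => PySem.Int.floordiv y 10)))).isEmpty <;> simp
    · simp [hr0]
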